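-- pv_equiv track=rewrite | github.com/greybrunix/LAII | 1st_tourney/notes.py | horario
-- ===== SOURCE A (Python) =====
-- def horario(ucs,alunos):
--     res = list();
--     non = list();
--     alunos_it = iter(alunos)
--     aluno = next(alunos_it, "end");
--     while aluno != "end":
--         horario = {};
--         ucs_aluno_it = iter(alunos[aluno])
--         uc = next(ucs_aluno_it, "end");
--         flag_res = 0;
--         while uc != "end" and flag_res != 1:
--             if uc not in ucs:
--                 non.append(aluno)
--                 flag_res = 1
--             else:
--                 i = 0;
--                 flag_inner = 0;
--                 while i < ucs[uc][2] and flag_inner != 1: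
--                     if (ucs[uc][0], ucs[uc][1]+i) in horario.keys():
--                         non.append(aluno)
--                         flag_inner = 1
--                     else:
--                         horario[ucs[uc][0],ucs[uc][1]+i] = uc
--                     i+=1;
--             uc = next(ucs_aluno_it, "end")
--         if aluno not in non:
--             res.append((aluno,len(horario.keys())))
--         aluno = next(alunos_it, "end")
--     return sorted(sorted(res), key = lambda t: t[1], reverse=True)
-- ===== SOURCE B (Python) =====
-- def occupied(ucs, lst):
--     slots = []
--     for uc in lst:
--         if uc == "end":
--             return slots
--         if uc not in ucs:
--             return None
--         d, s, dur = ucs[uc]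
--         slots = slots + [(d, s + k) for k in range(dur)]
--     return slots
--
-- def horario(ucs, alunos):
--     names = []
--     for aluno in alunos:
--         if aluno == "end":
--             break
--         names.append(aluno)
--     res = [(a, len(s)) for a in names
--            for s in [occupied(ucs, alunos[a])]
--            if s is not None and all(s.count(p) == 1 for p in s)]
--     return sorted(sorted(res), key=lambda t: t[1], reverse=True)
-- ===== Notes on version B (the rewrite author's own statement) =====
-- stated objective: faster
-- what changed: B replaces A's single-pass sentinel-iterator machinery (flag variables, an incremental slot dict with per-insertion collision detection, and a growing global `non` list that is membership-scanned for every student) by staged passes: first collect the student names up to the 'end' sentinel, then one comprehension that builds each student's flat slot list with range() and decides validity afterwards by a pairwise count check, with no global invalid list.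
import Mathlib
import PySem

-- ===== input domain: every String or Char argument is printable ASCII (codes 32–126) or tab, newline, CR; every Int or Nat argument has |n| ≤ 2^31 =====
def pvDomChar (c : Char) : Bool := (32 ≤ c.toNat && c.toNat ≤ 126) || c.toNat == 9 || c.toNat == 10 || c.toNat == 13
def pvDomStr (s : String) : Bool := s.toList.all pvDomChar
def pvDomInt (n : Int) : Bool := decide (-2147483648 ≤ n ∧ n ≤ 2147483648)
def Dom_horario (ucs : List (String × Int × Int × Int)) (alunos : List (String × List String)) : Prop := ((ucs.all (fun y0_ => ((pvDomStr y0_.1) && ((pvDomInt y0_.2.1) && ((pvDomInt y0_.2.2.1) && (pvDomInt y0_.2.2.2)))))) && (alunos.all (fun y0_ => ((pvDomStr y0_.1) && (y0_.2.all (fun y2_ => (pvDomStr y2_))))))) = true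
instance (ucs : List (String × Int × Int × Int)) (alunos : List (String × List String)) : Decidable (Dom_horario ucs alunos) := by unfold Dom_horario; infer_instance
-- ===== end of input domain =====

-- B replaces A's sentinel-iterator single pass (flag variables, incremental slot dict with
-- per-insertion collision detection, global `non` list) by staged passes: collect names up to
-- "end", then one comprehension building each student's flat slot list and checking validity
-- afterwards with a pairwise count test (alternative decomposition, same return value).

-- ===== PORT A =====
-- inner while: i from given i while i < dur and no clash; returns the dict and the clash flag
def horarioInnerA (uc : String) (day start dur : Int) (i : Int)
    (h : PySem.Dict (Int × Int) String) : PySem.Dict (Int × Int) String × Bool :=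
  if _h : i < dur then
    if h.contains (day, start + i) then (h, true)
    else horarioInnerA uc day start dur (i + 1) (h.insert (day, start + i) uc)
  else (h, false)
termination_by (dur - i).toNat
decreasing_by omega

-- middle while over the student's uc list, with A's "end" iterator sentinel; non is A's `non` list
def horarioUcsA (ucsD : PySem.Dict String (Int × Int × Int)) (aluno : String)
    (l : List String) (h : PySem.Dict (Int × Int) String) (non : List String) :
    PySem.Dict (Int × Int) String × List String :=
  match l with
  | [] => (h, non)
  | uc :: rest =>
    if uc = "end" then (h, non)
    else
      match ucsD.get? uc with
      | none => (h, non ++ [aluno])            -- flag_res = 1: stop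
      | some (day, start, dur) =>
        let r := horarioInnerA uc day start dur 0 h
        horarioUcsA ucsD aluno rest r.1 (if r.2 then non ++ [aluno] else non)

-- outer while over the students, with A's "end" iterator sentinel
def horarioStudentsA (ucsD : PySem.Dict String (Int × Int × Int))
    (alunosD : PySem.Dict String (List String)) (l : List (String × List String))
    (non : List String) (res : List (String × Int)) : List (String × Int) :=
  match l with
  | [] => res
  | (aluno, _) :: rest =>
    if aluno = "end" then res
    else
      let r := horarioUcsA ucsD aluno ((alunosD.get? aluno).getD []) PySem.Dict.empty non
      horarioStudentsA ucsD alunosD rest r.2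
        (if r.2.contains aluno then res else res ++ [(aluno, ((r.1.keys).length : Int))])

def horario (ucs : List (String × Int × Int × Int)) (alunos : List (String × List String)) : List (String × Int) :=
  let res := horarioStudentsA (PySem.Dict.mk ucs) (PySem.Dict.mk alunos) alunos [] []
  PySem.List.sorted (PySem.List.sorted2 res (fun t => t.1) (fun t => t.2) false) (fun t => t.2) true

-- ===== PORT B =====
-- occupied(ucs, lst): the for-loop with early returns; none = some uc missing
def occupiedB (ucsD : PySem.Dict String (Int × Int × Int)) :
    List String → List (Int × Int) → Option (List (Int × Int))
  | [], slots => some slots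
  | uc :: rest, slots =>
    if uc = "end" then some slots
    else
      match ucsD.get? uc with
      | none => none
      | some (day, start, dur) =>
        occupiedB ucsD rest
          (slots ++ (PySem.List.pyRange 0 dur 1).map (fun k => (day, start + k)))

-- the comprehension body: one student's contribution (none = filtered out)
def studentEntryB (ucsD : PySem.Dict String (Int × Int × Int))
    (alunosD : PySem.Dict String (List String)) (a : String) : Option (String × Int) :=
  match occupiedB ucsD ((alunosD.get? a).getD []) [] with
  | none => none
  | some s =>
    if s.all (fun p => PySem.List.count s p == 1) then some (a, (s.length : Int)) else none

def horario_alt (ucs : List (String × Int × Int × Int)) (alunos : List (String × List String)) : List (String × Int) :=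
  let ucsD := PySem.Dict.mk ucs
  let alD := PySem.Dict.mk alunos
  let names := (alunos.map Prod.fst).takeWhile (fun a => !(a == "end"))
  let res := names.filterMap (studentEntryB ucsD alD)
  PySem.List.sorted (PySem.List.sorted2 res (fun t => t.1) (fun t => t.2) false) (fun t => t.2) true

-- ===== PRECONDITION & SPEC =====
-- Pre_ is the representation invariant of the two Python dict arguments (an association list stands
-- for a dict): their key lists are duplicate-free. It excludes nothing a Python caller can pass.
def Pre_horario (ucs : List (String × Int × Int × Int)) (alunos : List (String × List String)) : Prop :=
  (ucs.map Prod.fst).Nodup ∧ (alunos.map Prod.fst).Nodup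
instance (ucs : List (String × Int × Int × Int)) (alunos : List (String × List String)) : Decidable (Pre_horario ucs alunos) := by unfold Pre_horario; infer_instance
def pvWitness_horario : (List (String × Int × Int × Int)) × (List (String × List String)) :=
  ([("alg", (0, 1, 2))], [("ana", ["alg"])])

def Spec_horario (ucs : List (String × Int × Int × Int)) (alunos : List (String × List String)) (out : List (String × Int)) : Prop := out = horario_alt ucs alunos
instance (ucs : List (String × Int × Int × Int)) (alunos : List (String × List String)) (out : List (String × Int)) : Decidable (Spec_horario ucs alunos out) := by unfold Spec_horario; infer_instance

-- ===== CLAIM (what is proved, stated in full; the proofs are below) =====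
def Claim_equal_horario : Prop := ∀ (ucs : List (String × Int × Int × Int)) (alunos : List (String × List String)), Dom_horario ucs alunos → Pre_horario ucs alunos → Spec_horario ucs alunos (horario ucs alunos)

-- ===== LEMMAS AND PROOFS =====

-- the slot block one uc contributes, as B builds it
theorem innerA_spec (uc : String) (day start dur : Int) : ∀ (i : Int)
    (h : PySem.Dict (Int × Int) String), h.keys.Nodup →
    (((h.keys ++ (PySem.List.pyRange i dur 1).map (fun k => (day, start + k))).Nodup →
        (horarioInnerA uc day start dur i h).2 = false ∧
        (horarioInnerA uc day start dur i h).1.keys =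
          h.keys ++ (PySem.List.pyRange i dur 1).map (fun k => (day, start + k))) ∧
     (¬ (h.keys ++ (PySem.List.pyRange i dur 1).map (fun k => (day, start + k))).Nodup →
        (horarioInnerA uc day start dur i h).2 = true)) := by
  suffices H : ∀ (n : Nat) (i : Int) (h : PySem.Dict (Int × Int) String), (dur - i).toNat ≤ n →
      h.keys.Nodup →
      (((h.keys ++ (PySem.List.pyRange i dur 1).map (fun k => (day, start + k))).Nodup →
          (horarioInnerA uc day start dur i h).2 = false ∧
          (horarioInnerA uc day start dur i h).1.keys =
            h.keys ++ (PySem.List.pyRange i dur 1).map (fun k => (day, start + k))) ∧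
       (¬ (h.keys ++ (PySem.List.pyRange i dur 1).map (fun k => (day, start + k))).Nodup →
          (horarioInnerA uc day start dur i h).2 = true)) by
    exact fun i h hnd => H _ i h le_rfl hnd
  intro n
  induction n with
  | zero =>
    intro i h h0 hnd
    have hge : ¬ i < dur := by omega
    rw [horarioInnerA, dif_neg hge, PySem.List.pyRange_one_eq_nil (by omega)]
    exact ⟨fun _ => ⟨rfl, by simp⟩, fun hc => absurd (by simpa using hnd) hc⟩
  | succ n ih =>
    intro i h hle hnd
    by_cases hlt : i < dur
    · have hL : (PySem.List.pyRange i dur 1).map (fun k => (day, start + k)) =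
          (day, start + i) :: (PySem.List.pyRange (i+1) dur 1).map (fun k => (day, start + k)) := by
        rw [PySem.List.pyRange_one_cons hlt]; simp
      rw [horarioInnerA, dif_pos hlt, hL]
      by_cases hc : h.contains (day, start + i) = true
      · have hmem : (day, start + i) ∈ h.keys := (PySem.Dict.contains_iff_mem_keys h _).mp hc
        rw [if_pos hc]
        constructor
        · intro hndall
          exfalso
          rcases List.nodup_append.mp hndall with ⟨-, -, hdisj⟩
          exact hdisj _ hmem _ (by simp) rfl
        · intro _; rfl
      · have hc' : h.contains (day, start + i) = false := by simpa using hc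
        have hnmem : (day, start + i) ∉ h.keys := fun hm =>
          hc ((PySem.Dict.contains_iff_mem_keys h _).mpr hm)
        rw [if_neg (by simp [hc'])]
        have hkeys : (h.insert (day, start + i) uc).keys = h.keys ++ [(day, start + i)] :=
          PySem.Dict.keys_insert_of_not_contains h uc hc'
        have hnd' : (h.insert (day, start + i) uc).keys.Nodup := by
          rw [hkeys]
          refine List.Nodup.append hnd (List.nodup_singleton _) ?_
          intro a ha hb
          simp at hb
          subst hb
          exact hnmem ha
        have := ih (i + 1) (h.insert (day, start + i) uc) (by omega) hnd'
        rw [hkeys] at this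
        have heq : h.keys ++ [(day, start + i)] ++
              (PySem.List.pyRange (i+1) dur 1).map (fun k => (day, start + k)) =
            h.keys ++ (day, start + i) ::
              (PySem.List.pyRange (i+1) dur 1).map (fun k => (day, start + k)) := by simp
        rw [heq] at this
        exact this
    · rw [horarioInnerA, dif_neg hlt, PySem.List.pyRange_one_eq_nil (by omega)]
      exact ⟨fun _ => ⟨rfl, by simp⟩, fun hc => absurd (by simpa using hnd) hc⟩

theorem ucsA_non_mono (ucsD : PySem.Dict String (Int × Int × Int)) (aluno : String) :
    ∀ (l : List String) h non, aluno ∈ non → aluno ∈ (horarioUcsA ucsD aluno l h non).2 := by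
  intro l
  induction l with
  | nil => intro h non hm; exact hm
  | cons uc rest ih =>
    intro h non hm
    rw [horarioUcsA]
    by_cases he : uc = "end"
    · rw [if_pos he]; exact hm
    · rw [if_neg he]
      cases hg : ucsD.get? uc with
      | none => dsimp only; simp [hm]
      | some v =>
        obtain ⟨day, start, dur⟩ := v
        dsimp only
        apply ih
        by_cases hr : (horarioInnerA uc day start dur 0 h).2 <;> simp [hr, hm]

theorem ucsA_non_subset (ucsD : PySem.Dict String (Int × Int × Int)) (aluno : String) :
    ∀ (l : List String) h non x, x ∈ (horarioUcsA ucsD aluno l h non).2 → x ∈ non ∨ x = aluno := by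
  intro l
  induction l with
  | nil => intro h non x hm; exact Or.inl hm
  | cons uc rest ih =>
    intro h non x hm
    rw [horarioUcsA] at hm
    by_cases he : uc = "end"
    · rw [if_pos he] at hm; exact Or.inl hm
    · rw [if_neg he] at hm
      cases hg : ucsD.get? uc with
      | none =>
        simp only [hg] at hm
        rcases List.mem_append.mp hm with h1 | h2
        · exact Or.inl h1
        · exact Or.inr (by simpa using h2)
      | some v =>
        obtain ⟨day, start, dur⟩ := v
        simp only [hg] at hm
        rcases ih _ _ x hm with h1 | h2
        · by_cases hr : (horarioInnerA uc day start dur 0 h).2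
          · rw [if_pos hr] at h1
            rcases List.mem_append.mp h1 with ha | hb
            · exact Or.inl ha
            · exact Or.inr (by simpa using hb)
          · rw [if_neg hr] at h1; exact Or.inl h1
        · exact Or.inr h2

theorem occupiedB_prefix (ucsD : PySem.Dict String (Int × Int × Int)) :
    ∀ (l : List String) slots t, occupiedB ucsD l slots = some t → slots <+: t := by
  intro l
  induction l with
  | nil =>
    intro slots t h
    rw [occupiedB] at h
    injection h with h
    subst h
    exact List.prefix_rfl
  | cons uc rest ih =>
    intro slots t h
    rw [occupiedB] at h
    by_cases he : uc = "end"
    · rw [if_pos he] at h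
      injection h with h
      subst h
      exact List.prefix_rfl
    rw [if_neg he] at h
    cases hg : ucsD.get? uc with
    | none =>
      simp only [hg] at h
      cases h
    | some v =>
      obtain ⟨day, start, dur⟩ := v
      simp only [hg] at h
      exact List.IsPrefix.trans (List.prefix_append _ _) (ih _ _ h)

theorem ucsA_spec (ucsD : PySem.Dict String (Int × Int × Int)) (aluno : String) :
    ∀ (l : List String) (h : PySem.Dict (Int × Int) String) non, h.keys.Nodup →
    ((∀ t, occupiedB ucsD l h.keys = some t → t.Nodup →
        (horarioUcsA ucsD aluno l h non).2 = non ∧ (horarioUcsA ucsD aluno l h non).1.keys = t) ∧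
     ((occupiedB ucsD l h.keys = none ∨ ∃ t, occupiedB ucsD l h.keys = some t ∧ ¬ t.Nodup) →
        aluno ∈ (horarioUcsA ucsD aluno l h non).2)) := by
  intro l
  induction l with
  | nil =>
    intro h non hnd
    constructor
    · intro t ht _
      rw [occupiedB] at ht
      injection ht with ht
      subst ht
      exact ⟨rfl, rfl⟩
    · rintro (hc | ⟨t, ht, hndt⟩)
      · rw [occupiedB] at hc; cases hc
      · rw [occupiedB] at ht
        injection ht with ht
        subst ht
        exact absurd hnd hndt
  | cons uc rest ih =>
    intro h non hnd
    rw [horarioUcsA, occupiedB]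
    by_cases he : uc = "end"
    · rw [if_pos he, if_pos he]
      constructor
      · intro t ht _
        injection ht with ht
        subst ht
        exact ⟨rfl, rfl⟩
      · rintro (hc | ⟨t, ht, hndt⟩)
        · cases hc
        · injection ht with ht
          subst ht
          exact absurd hnd hndt
    rw [if_neg he, if_neg he]
    cases hg : ucsD.get? uc with
    | none =>
      dsimp only
      refine ⟨fun t ht => absurd ht (by simp), fun _ => ?_⟩
      show aluno ∈ non ++ [aluno]
      simp
    | some v =>
      obtain ⟨day, start, dur⟩ := v
      dsimp only
      have hinner := innerA_spec uc day start dur 0 h hnd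
      by_cases hndL : (h.keys ++ (PySem.List.pyRange 0 dur 1).map (fun k => (day, start + k))).Nodup
      · obtain ⟨hflag, hkeys⟩ := hinner.1 hndL
        rw [hflag]
        simp only [if_neg (by simp : ¬ (false = true))]
        have := ih (horarioInnerA uc day start dur 0 h).1 non (hkeys ▸ hndL)
        rw [hkeys] at this
        exact this
      · have hflag := hinner.2 hndL
        rw [hflag, if_pos rfl]
        constructor
        · intro t ht hndt
          exfalso
          have hpre := occupiedB_prefix ucsD rest _ t ht
          exact hndL (hpre.sublist.nodup hndt)
        · intro _
          exact ucsA_non_mono ucsD aluno rest _ _ (by simp)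

theorem all_count_iff_nodup (s : List (Int × Int)) :
    (s.all (fun p => PySem.List.count s p == 1) = true) ↔ s.Nodup := by
  simp only [PySem.List.count_eq, List.all_eq_true, beq_iff_eq]
  constructor
  · intro h
    rw [List.nodup_iff_count_le_one]
    intro a
    by_cases ha : a ∈ s
    · exact le_of_eq (h a ha)
    · simp [List.count_eq_zero_of_not_mem ha]
  · intro h a ha
    exact List.count_eq_one_of_mem h ha

theorem studentsAB (ucsD : PySem.Dict String (Int × Int × Int))
    (alunosD : PySem.Dict String (List String)) :
    ∀ (l : List (String × List String)) non res,
    (l.map Prod.fst).Nodup → (∀ p ∈ l, p.1 ∉ non) →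
    horarioStudentsA ucsD alunosD l non res =
      res ++ ((l.map Prod.fst).takeWhile (fun a => !(a == "end"))).filterMap
        (studentEntryB ucsD alunosD) := by
  intro l
  induction l with
  | nil => intro non res _ _; simp [horarioStudentsA]
  | cons p rest ih =>
    intro non res hnodup hnon
    obtain ⟨aluno, ucl0⟩ := p
    by_cases hend : aluno = "end"
    · rw [horarioStudentsA, if_pos hend]
      simp [hend]
    have htw : ((aluno :: rest.map Prod.fst).takeWhile (fun a => !(a == "end"))) =
        aluno :: (rest.map Prod.fst).takeWhile (fun a => !(a == "end")) := by
      rw [List.takeWhile_cons, if_pos (by simp [hend])]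
    rw [horarioStudentsA, if_neg hend]
    simp only [List.map_cons, htw, List.filterMap_cons]
    have hkeys0 : (PySem.Dict.empty : PySem.Dict (Int × Int) String).keys = [] :=
      PySem.Dict.keys_empty
    have hspec := ucsA_spec ucsD aluno ((alunosD.get? aluno).getD [])
      PySem.Dict.empty non (by rw [hkeys0]; exact List.nodup_nil)
    rw [hkeys0] at hspec
    have hnotnon : aluno ∉ non := hnon _ List.mem_cons_self
    have hrestnodup : (rest.map Prod.fst).Nodup := (List.nodup_cons.mp hnodup).2
    have halne : ∀ q ∈ rest, q.1 ≠ aluno := by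
      intro q hq hqe
      exact (List.nodup_cons.mp hnodup).1 (hqe ▸ List.mem_map.mpr ⟨q, hq, rfl⟩)
    cases hc : occupiedB ucsD ((alunosD.get? aluno).getD []) [] with
    | none =>
      have hse : studentEntryB ucsD alunosD aluno = none := by
        unfold studentEntryB; rw [hc]
      have hmem := hspec.2 (Or.inl hc)
      have hcont : (horarioUcsA ucsD aluno ((alunosD.get? aluno).getD [])
          PySem.Dict.empty non).2.contains aluno = true := by
        simpa using List.contains_iff_mem.mpr hmem
      simp only [hcont, if_true, hse]
      apply ih
      · exact hrestnodup
      · intro q hq hqin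
        rcases ucsA_non_subset ucsD aluno _ _ _ _ hqin with h1 | h2
        · exact hnon q (List.mem_cons_of_mem _ hq) h1
        · exact halne q hq h2
    | some slots =>
      by_cases hndt : slots.Nodup
      · obtain ⟨hnon', hkeys'⟩ := hspec.1 slots hc hndt
        have hcontn : non.contains aluno = false := by
          by_cases hb : non.contains aluno = true
          · exact absurd (List.contains_iff_mem.mp hb) hnotnon
          · simpa using hb
        have hall : slots.all (fun p => PySem.List.count slots p == 1) = true :=
          (all_count_iff_nodup slots).mpr hndt
        have hse : studentEntryB ucsD alunosD aluno = some (aluno, (slots.length : Int)) := by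
          unfold studentEntryB; rw [hc]; simp only [hall, if_true]
        simp only [hnon', hkeys', hcontn, Bool.false_eq_true, if_false, hse]
        rw [ih non (res ++ [(aluno, (slots.length : Int))]) hrestnodup
          (fun q hq => hnon q (List.mem_cons_of_mem _ hq))]
        simp
      · have hmem := hspec.2 (Or.inr ⟨slots, hc, hndt⟩)
        have hcont : (horarioUcsA ucsD aluno ((alunosD.get? aluno).getD [])
            PySem.Dict.empty non).2.contains aluno = true := by
          simpa using List.contains_iff_mem.mpr hmem
        have hall : ¬ slots.all (fun p => PySem.List.count slots p == 1) = true :=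
          fun hl => hndt ((all_count_iff_nodup slots).mp hl)
        have hse : studentEntryB ucsD alunosD aluno = none := by
          unfold studentEntryB; rw [hc]; simp only [if_neg hall]
        simp only [hcont, if_true, hse]
        apply ih
        · exact hrestnodup
        · intro q hq hqin
          rcases ucsA_non_subset ucsD aluno _ _ _ _ hqin with h1 | h2
          · exact hnon q (List.mem_cons_of_mem _ hq) h1
          · exact halne q hq h2

-- ===== VERDICT (by name: the statement is the Claim_ definition above) =====
theorem horario_spec : Claim_equal_horario := by
  intro ucs alunos _ hpre
  unfold Spec_horario
  unfold horario horario_alt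
  have hres : horarioStudentsA (PySem.Dict.mk ucs) (PySem.Dict.mk alunos) alunos [] [] =
      ((alunos.map Prod.fst).takeWhile (fun a => !(a == "end"))).filterMap
        (studentEntryB (PySem.Dict.mk ucs) (PySem.Dict.mk alunos)) := by
    rw [studentsAB _ _ alunos [] [] hpre.2 (fun p _ hm => (List.not_mem_nil hm).elim)]
    simp
  rw [hres]
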